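-- pv_equiv track=rewrite | github.com/chiehli/LeetCode | ArrayPairSum.py | find_max_min_sum
-- ===== SOURCE A (Python) =====
-- def find_max_min_sum(nums):
--     """
--     Thoughts:
--     Pair the max and second max so that we can include second max in our answer,
--     where second max is the max value to contribute to a bigger sum
--
--     So sort the integer array first and group the adjacent numbers as a pair,
--     sum the smaller one
--
--     runtime: 248 ms, faster than 96.86% of Python online submission
--     memory usage: 15.2 MB, less than 6.06% of Python online submission
--     """
--
--     if not nums:
--         return 0
--
--     nums.sort()
--
--     ans = 0
--     N = len(nums)
--
--     for i in range(0, N, 2): # increment by 2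
--         ans += nums[i]
--
--     return ans
-- ===== SOURCE B (Python) =====
-- def find_max_min_sum(nums):
--     # Count multiplicities once, then walk the DISTINCT values in sorted order,
--     # adding v times the number of even global positions its block covers --
--     # no expansion of duplicates, only the distinct values are sorted.
--     # (Unlike A, does not sort `nums` in place; the return value is identical.)
--     cnt = {}
--     for v in nums:
--         cnt[v] = cnt.get(v, 0) + 1
--     ans = 0
--     pos = 0
--     for v in sorted(cnt):
--         c = cnt[v]
--         ans += v * ((c + 1 - pos % 2) // 2)
--         pos += c
--     return ans
-- ===== Notes on version B (the rewrite author's own statement) =====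
-- stated objective: alternative
-- what changed: Instead of sorting the whole list and striding over every other index, B builds a count dictionary in one pass, sorts only the distinct values, and adds v times the number of even global positions covered by v's block of duplicates, tracked with a running position counter; B also does not mutate nums (A sorts it in place).
import Mathlib
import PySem

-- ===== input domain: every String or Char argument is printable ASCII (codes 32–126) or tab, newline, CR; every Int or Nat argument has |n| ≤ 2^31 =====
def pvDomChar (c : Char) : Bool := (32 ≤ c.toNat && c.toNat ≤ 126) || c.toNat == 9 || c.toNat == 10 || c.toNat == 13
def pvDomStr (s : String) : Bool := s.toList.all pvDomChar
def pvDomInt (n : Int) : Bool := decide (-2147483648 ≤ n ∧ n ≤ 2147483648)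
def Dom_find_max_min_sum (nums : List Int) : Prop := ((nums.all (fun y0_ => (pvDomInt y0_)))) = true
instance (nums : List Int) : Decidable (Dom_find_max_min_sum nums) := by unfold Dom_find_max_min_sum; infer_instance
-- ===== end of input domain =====

-- B replaces A's sort-everything-then-stride-loop by a counting dict: only the distinct
-- values are sorted and each contributes v * (number of even global positions in its block)
-- (alternative algorithm; A sorts `nums` in place, B does not — the equivalence proved is
-- about the return value).


-- ===== PORT A =====
def find_max_min_sum (nums : List Int) : Int :=
  if nums = [] then 0
  else
    let s := PySem.List.sorted nums (fun x => x)
    let N : Int := (s.length : Int)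
    -- the loop index i = 0, 2, … is always in range, so nums[i] never raises; default 0 unreachable
    (PySem.List.pyRange 0 N 2).foldl (fun ans i => ans + PySem.List.pyGetD s i 0) 0

-- ===== PORT B =====
def find_max_min_sum_alt (nums : List Int) : Int :=
  let cnt : PySem.Dict Int Int :=
    nums.foldl (fun d v => d.insert v (d.getD v 0 + 1)) PySem.Dict.empty
  -- sorted(cnt) iterates the dict's keys; cnt[v] is present for every such v, default 0 unreachable
  let r :=
    (PySem.List.sorted cnt.keys (fun x => x)).foldl
      (fun st v =>
        let c := cnt.getD v 0
        (st.1 + v * PySem.Int.floordiv (c + 1 - PySem.Int.mod st.2 2) 2, st.2 + c))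
      ((0 : Int), (0 : Int))
  r.1

-- ===== PRECONDITION & SPEC =====
def Spec_find_max_min_sum (nums : List Int) (out : Int) : Prop := out = find_max_min_sum_alt nums
instance (nums : List Int) (out : Int) : Decidable (Spec_find_max_min_sum nums out) := by unfold Spec_find_max_min_sum; infer_instance

-- ===== CLAIM (what is proved, stated in full; the proofs are below) =====
def Claim_equal_find_max_min_sum : Prop := ∀ (nums : List Int), Dom_find_max_min_sum nums → Spec_find_max_min_sum nums (find_max_min_sum nums)

-- ===== LEMMAS AND PROOFS =====

-- sum of the elements at even (b = true) resp. odd (b = false) 0-based positions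
def pvAltSum : Bool → List Int → Int
  | _, [] => 0
  | b, x :: xs => (if b then x else 0) + pvAltSum (!b) xs

theorem pv_foldl_add_eq_sum_map (l : List ℕ) (f : ℕ → ℤ) (a : ℤ) :
    l.foldl (fun acc k => acc + f k) a = a + (l.map f).sum := by
  induction l generalizing a with
  | nil => simp
  | cons x l ih => simp [ih, add_assoc]

-- A's fold over range(0, N, 2) is the sum over the even indices of t
theorem pv_A_side (t : List Int) :
    (PySem.List.pyRange 0 (t.length : Int) 2).foldl (fun ans i => ans + PySem.List.pyGetD t i 0) 0
      = ((List.range ((t.length + 1) / 2)).map (fun k => t.getD (2 * k) 0)).sum := by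
  rw [PySem.List.pyRange_of_pos 0 (t.length : Int) (by norm_num), List.foldl_map,
    pv_foldl_add_eq_sum_map, zero_add]
  have hc : (if (0 : Int) < (t.length : Int) then (((t.length : Int) - 0 + 2 - 1) / 2).toNat else 0)
      = (t.length + 1) / 2 := by
    split_ifs with h <;> omega
  rw [hc]
  congr 1
  apply List.map_congr_left
  intro k hk
  rw [PySem.List.pyGetD_of_nonneg t 0 (by positivity)]
  congr 1
  omega

-- the even-index sum is pvAltSum true (proved jointly with the odd-index sum)
theorem pv_altSum_eq_rangeSum (t : List Int) :
    pvAltSum true t = ((List.range ((t.length + 1) / 2)).map (fun k => t.getD (2 * k) 0)).sum ∧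
    pvAltSum false t = ((List.range (t.length / 2)).map (fun k => t.getD (2 * k + 1) 0)).sum := by
  induction t with
  | nil => simp [pvAltSum]
  | cons x t ih =>
    constructor
    · have h1 : ((x :: t).length + 1) / 2 = t.length / 2 + 1 := by simp; omega
      rw [pvAltSum, h1, List.range_succ_eq_map]
      simp only [List.map_cons, List.map_map, List.sum_cons, mul_zero, List.getD_cons_zero]
      have h2 : (List.map ((fun k => (x :: t).getD (2 * k) 0) ∘ Nat.succ) (List.range (t.length / 2)))
          = (List.range (t.length / 2)).map (fun k => t.getD (2 * k + 1) 0) := by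
        apply List.map_congr_left; intro k hk
        show (x :: t).getD (2 * (k + 1)) 0 = t.getD (2 * k + 1) 0
        have : 2 * (k + 1) = (2 * k + 1) + 1 := by omega
        rw [this, List.getD_cons_succ]
      rw [h2]
      simp [ih.2]
    · have h1 : (x :: t).length / 2 = (t.length + 1) / 2 := by simp
      rw [pvAltSum, h1]
      have h2 : (List.range ((t.length + 1) / 2)).map (fun k => (x :: t).getD (2 * k + 1) 0)
          = (List.range ((t.length + 1) / 2)).map (fun k => t.getD (2 * k) 0) := by
        apply List.map_congr_left; intro k hk; simp
      rw [h2]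
      simpa using ih.1

theorem pv_altSum_replicate (c : Nat) (v : Int) (b : Bool) (rest : List Int) :
    pvAltSum b (List.replicate c v ++ rest)
      = v * (((c + (if b then 1 else 0)) / 2 : Nat) : Int)
        + pvAltSum (if c % 2 = 0 then b else !b) rest := by
  induction c generalizing b with
  | zero => cases b <;> simp
  | succ c ih =>
    rw [List.replicate_succ, List.cons_append, pvAltSum, ih]
    cases b with
    | true =>
      have h1 : (c + if (!true) = true then 1 else 0) / 2 = c / 2 := by simp
      have h2 : (c + 1 + if true = true then 1 else 0) / 2 = c / 2 + 1 := by simp; omega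
      have h3 : (if (c + 1) % 2 = 0 then true else !true) = (if c % 2 = 0 then !true else !(!true)) := by
        rcases Nat.mod_two_eq_zero_or_one c with h | h <;> simp [Nat.add_mod, h]
      rw [h1, h2, h3]
      push_cast
      simp
      ring
    | false =>
      have h1 : (c + if (!false) = true then 1 else 0) / 2 = (c + 1) / 2 := by simp
      have h2 : (c + 1 + if false = true then 1 else 0) / 2 = (c + 1) / 2 := by simp
      have h3 : (if (c + 1) % 2 = 0 then false else !false) = (if c % 2 = 0 then !false else !(!false)) := by
        rcases Nat.mod_two_eq_zero_or_one c with h | h <;> simp [Nat.add_mod, h]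
      rw [h1, h2, h3]
      simp

-- B's value loop computes the even-position sum of the expanded (sorted) list
theorem pv_B_fold (nums : List Int) (K : List Int) (a : Int) (p : Nat) :
    (K.foldl
      (fun st v =>
        let c := ((nums.count v : Nat) : Int)
        (st.1 + v * PySem.Int.floordiv (c + 1 - PySem.Int.mod st.2 2) 2, st.2 + c))
      (a, (p : Int))).1
      = a + pvAltSum (p % 2 == 0) (K.flatMap (fun v => List.replicate (nums.count v) v)) := by
  induction K generalizing a p with
  | nil => simp [pvAltSum]
  | cons v K ih =>
    rw [List.foldl_cons, List.flatMap_cons, pv_altSum_replicate]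
    have hmod : PySem.Int.mod (p : Int) 2 = ((p % 2 : Nat) : Int) := by
      exact_mod_cast PySem.Int.mod_natCast p 2
    have hfd : PySem.Int.floordiv (((nums.count v : Nat) : Int) + 1 - PySem.Int.mod (p : Int) 2) 2
        = (((nums.count v + (if (p % 2 == 0) then 1 else 0)) / 2 : Nat) : Int) := by
      rw [hmod]
      rcases Nat.mod_two_eq_zero_or_one p with h | h <;> rw [h] <;> norm_num
    have hp2 : ((p : Int) + ((nums.count v : Nat) : Int)) = (((p + nums.count v : Nat)) : Int) := by push_cast; ring
    simp only [hfd, hp2]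
    rw [ih]
    have hpar : ((p + nums.count v) % 2 == 0) = (if nums.count v % 2 = 0 then (p % 2 == 0) else !(p % 2 == 0)) := by
      rcases Nat.mod_two_eq_zero_or_one p with h | h <;>
      rcases Nat.mod_two_eq_zero_or_one (nums.count v) with h2 | h2 <;>
        simp [Nat.add_mod, h, h2]
    rw [hpar]
    ring

theorem pv_flat_pairwise (c : Int → Nat) (K : List Int) (h : K.Pairwise (· < ·)) :
    (K.flatMap (fun v => List.replicate (c v) v)).Pairwise (· ≤ ·) := by
  induction K with
  | nil => simp
  | cons v K ih =>
    rw [List.flatMap_cons, List.pairwise_append]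
    refine ⟨List.pairwise_replicate.mpr (Or.inr le_rfl), ih (List.Pairwise.of_cons h), ?_⟩
    intro x hx y hy
    rcases List.mem_flatMap.mp hy with ⟨w, hwK, hyw⟩
    rw [List.eq_of_mem_replicate hx, List.eq_of_mem_replicate hyw]
    exact le_of_lt ((List.pairwise_cons.mp h).1 w hwK)

theorem pv_flat_count (c : Int → Nat) (K : List Int) (hnd : K.Nodup) (x : Int) :
    (K.flatMap (fun v => List.replicate (c v) v)).count x = if x ∈ K then c x else 0 := by
  induction K with
  | nil => simp
  | cons v K ih =>
    rw [List.flatMap_cons, List.count_append, ih hnd.of_cons, List.count_replicate]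
    have hvK : v ∉ K := (List.nodup_cons.mp hnd).1
    by_cases hxv : x = v
    · subst hxv
      simp [hvK]
    · simp [Ne.symm hxv, hxv, List.mem_cons]

-- sorted(nums) is the concatenation of the duplicate blocks of the sorted distinct values
theorem pv_sorted_decomp (nums : List Int) :
    PySem.List.sorted nums (fun x => x)
      = (PySem.List.sorted (PySem.Set.ofList nums) (fun x => x)).flatMap
          (fun v => List.replicate (nums.count v) v) := by
  set K := PySem.List.sorted (PySem.Set.ofList nums) (fun x => x) with hK
  have hlt : K.Pairwise (· < ·) := PySem.List.sorted_ofList_pairwise_lt nums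
  have hnd : K.Nodup := hlt.nodup
  have hmemK : ∀ x, x ∈ K ↔ x ∈ nums := by
    intro x
    rw [hK, PySem.List.mem_sorted]
    exact PySem.Set.mem_ofList nums x
  have hperm : (K.flatMap (fun v => List.replicate (nums.count v) v)).Perm nums := by
    rw [List.perm_iff_count]
    intro x
    rw [pv_flat_count _ K hnd x]
    by_cases hx : x ∈ K
    · simp [hx]
    · simp [hx]
      exact (List.count_eq_zero.mpr (fun h => hx ((hmemK x).mpr h))).symm
  exact PySem.List.sorted_id_eq_of_perm_of_pairwise nums _ hperm
    (pv_flat_pairwise (fun v => nums.count v) K hlt)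

theorem pv_B_eq_altSum (nums : List Int) :
    find_max_min_sum_alt nums = pvAltSum true (PySem.List.sorted nums (fun x => x)) := by
  unfold find_max_min_sum_alt
  simp only [PySem.Dict.foldl_insert_getD_add_one_eq_counter, PySem.Dict.getD_counter,
    PySem.Dict.keys_counter]
  have h := pv_B_fold nums (PySem.List.sorted (PySem.Set.ofList nums) (fun x => x)) 0 0
  simp only [Nat.cast_zero] at h
  rw [h, pv_sorted_decomp nums]
  norm_num

-- ===== VERDICT (by name: the statement is the Claim_ definition above) =====
theorem find_max_min_sum_spec : Claim_equal_find_max_min_sum := by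
  intro nums _
  unfold Spec_find_max_min_sum
  rw [pv_B_eq_altSum]
  unfold find_max_min_sum
  by_cases h : nums = []
  · rw [if_pos h, h]
    have hs : PySem.List.sorted ([] : List Int) (fun x => x) = [] :=
      (PySem.List.sorted_eq_nil_iff ([] : List Int) (fun x => x) false).mpr rfl
    rw [hs]
    rfl
  · rw [if_neg h]
    rw [pv_A_side, (pv_altSum_eq_rangeSum _).1]
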